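-- pv_equiv track=rewrite | github.com/sin2thecirus-collab/claudi-time | app/services/domain_protection_service.py | select_best_mailbox
-- ===== SOURCE A (Python) =====
-- def get_domain_from_email(email: str) -> str:
--     """Extrahiert Domain aus E-Mail-Adresse."""
--     if "@" in email:
--         return email.split("@", 1)[1].lower()
--     return ""
--
-- def select_best_mailbox(
--     mailboxes: list[dict],
--     preferred_domain: str | None = None,
--     exclude_domains: list[str] | None = None,
--     mailbox_counts: dict[str, int] | None = None,
-- ) -> dict | None:
--     """Waehlt das beste Postfach mit Round-Robin-Rotation.
--
--     Strategie:
--     1. Domain-Konsistenz: Wenn preferred_domain gesetzt, NUR Postfaecher dieser Domain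
--     2. Innerhalb der Domain: Das Postfach mit den WENIGSTEN bisherigen Sends (Round-Robin)
--     3. Fallback: Wenn keine preferred_domain, alle verfuegbaren Domains, wenigste Sends zuerst
--
--     Args:
--         mailboxes: Liste der verfuegbaren Postfaecher
--         preferred_domain: Bevorzugte Domain (Domain-Konsistenz)
--         exclude_domains: Domains die ausgeschlossen werden sollen (Limit erreicht)
--         mailbox_counts: Dict {email: anzahl_sends} fuer Round-Robin (optional)
--
--     Returns:
--         Mailbox-Dict oder None wenn keines verfuegbar.
--     """
--     exclude = set(exclude_domains or [])
--     counts = mailbox_counts or {}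
--
--     def _pick_least_used(candidates: list[dict]) -> dict | None:
--         """Waehlt aus den Kandidaten das Postfach mit den wenigsten Sends."""
--         if not candidates:
--             return None
--         if not counts:
--             return candidates[0]
--         return min(candidates, key=lambda mb: counts.get(mb["email"], 0))
--
--     # Erst: Bevorzugte Domain (Domain-Konsistenz) — Round-Robin innerhalb
--     if preferred_domain:
--         domain_mailboxes = [
--             mb for mb in mailboxes
--             if get_domain_from_email(mb["email"]) == preferred_domain
--             and get_domain_from_email(mb["email"]) not in exclude
--         ]
--         result = _pick_least_used(domain_mailboxes)
--         if result:
--             return result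
--
--     # Fallback: Alle verfuegbaren Domains — Round-Robin ueber alle
--     all_available = [
--         mb for mb in mailboxes
--         if get_domain_from_email(mb["email"]) not in exclude
--     ]
--     return _pick_least_used(all_available)
-- ===== SOURCE B (Python) =====
-- def get_domain_from_email(email: str) -> str:
--     if "@" in email:
--         return email.split("@", 1)[1].lower()
--     return ""
--
-- def select_best_mailbox(
--     mailboxes,
--     preferred_domain=None,
--     exclude_domains=None,
--     mailbox_counts=None,
-- ):
--     """Single pass: running minima for 'all' and for the preferred domain."""
--     exclude = set(exclude_domains or [])
--     counts = mailbox_counts or {}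
--     best_all = best_pref = None
--     best_all_c = best_pref_c = 0
--     for mb in mailboxes:
--         email = mb["email"]
--         d = get_domain_from_email(email)
--         if d in exclude:
--             continue
--         c = counts.get(email, 0)
--         if best_all is None or c < best_all_c:
--             best_all, best_all_c = mb, c
--         if preferred_domain and d == preferred_domain and (
--             best_pref is None or c < best_pref_c
--         ):
--             best_pref, best_pref_c = mb, c
--     if preferred_domain and best_pref is not None:
--         return best_pref
--     return best_all
-- ===== Notes on version B (the rewrite author's own statement) =====
-- stated objective: alternative
-- what changed: Replaces two list-building filter passes plus min scans (and the preferred-then-fallback re-scan) by a single traversal of mailboxes maintaining two running minima (best overall and best of the preferred domain) with strict-< updates that preserve first-occurrence tie-breaking.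
import Mathlib
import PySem

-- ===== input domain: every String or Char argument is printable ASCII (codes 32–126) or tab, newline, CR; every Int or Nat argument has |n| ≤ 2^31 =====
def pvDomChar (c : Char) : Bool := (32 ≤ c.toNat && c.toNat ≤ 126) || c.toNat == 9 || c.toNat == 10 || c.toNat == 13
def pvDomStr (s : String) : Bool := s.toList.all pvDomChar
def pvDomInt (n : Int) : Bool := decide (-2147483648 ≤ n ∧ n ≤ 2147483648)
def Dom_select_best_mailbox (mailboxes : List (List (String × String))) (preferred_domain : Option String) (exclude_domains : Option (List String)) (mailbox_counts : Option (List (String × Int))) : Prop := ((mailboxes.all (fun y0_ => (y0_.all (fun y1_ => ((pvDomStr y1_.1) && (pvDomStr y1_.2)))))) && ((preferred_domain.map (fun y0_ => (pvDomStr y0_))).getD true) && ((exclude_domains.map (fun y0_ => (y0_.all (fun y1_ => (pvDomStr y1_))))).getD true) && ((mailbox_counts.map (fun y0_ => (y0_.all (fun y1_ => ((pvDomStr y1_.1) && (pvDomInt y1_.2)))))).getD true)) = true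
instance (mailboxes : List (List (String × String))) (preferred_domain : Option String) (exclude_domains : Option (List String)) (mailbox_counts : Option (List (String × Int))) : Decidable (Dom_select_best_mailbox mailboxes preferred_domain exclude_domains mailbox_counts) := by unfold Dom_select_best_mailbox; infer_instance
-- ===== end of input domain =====

-- ===== PORT A =====
-- B is a single-pass rewrite of A (two running minima instead of filter passes + min scans); equal return value proved on Pre_.

-- mb["email"]  (Pre_ guarantees the key is present; Python raises KeyError otherwise)
def mbEmail (mb : List (String × String)) : String :=
  ((PySem.Dict.mk mb).get? "email").getD ""

-- get_domain_from_email
def pyGetDomain (email : String) : String :=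
  if PySem.Str.isIn "@" email then
    PySem.Str.lower (PySem.List.pyGetD ((PySem.Str.splitMax? email "@" 1).getD []) 1 "")
  else ""

-- _pick_least_used
def pickLeastUsed (counts : PySem.Dict String Int) (candidates : List (List (String × String))) : Option (List (String × String)) :=
  if candidates = [] then none
  else if counts.items = [] then some (PySem.List.pyGetD candidates 0 [])
  else PySem.List.min? candidates (fun mb => counts.getD (mbEmail mb) 0)

def select_best_mailbox (mailboxes : List (List (String × String))) (preferred_domain : Option String) (exclude_domains : Option (List String)) (mailbox_counts : Option (List (String × Int))) : Option (List (String × String)) :=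
  let exclude := PySem.Set.ofList (exclude_domains.getD [])
  let counts := PySem.Dict.mk (mailbox_counts.getD [])
  let preferredResult : Option (List (String × String)) :=
    match preferred_domain with
    | some p =>
        if p ≠ "" then
          pickLeastUsed counts (mailboxes.filter (fun mb =>
            pyGetDomain (mbEmail mb) == p && !(PySem.Set.contains exclude (pyGetDomain (mbEmail mb)))))
        else none
    | none => none
  match preferredResult with
  | some r =>
      if r ≠ [] then some r   -- Python "if result:": an empty dict would be falsy
      else pickLeastUsed counts (mailboxes.filter (fun mb => !(PySem.Set.contains exclude (pyGetDomain (mbEmail mb)))))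
  | none => pickLeastUsed counts (mailboxes.filter (fun mb => !(PySem.Set.contains exclude (pyGetDomain (mbEmail mb)))))

-- ===== PORT B =====
-- "best is None or c < best_c" update of one running minimum (mailbox, its count)
def altUpd (mb : List (String × String)) (c : Int) (s : Option (List (String × String) × Int)) : Option (List (String × String) × Int) :=
  match s with
  | none => some (mb, c)
  | some (b, bc) => if c < bc then some (mb, c) else some (b, bc)

-- Python "preferred_domain and d == preferred_domain"
def altPrefOk (preferred_domain : Option String) (d : String) : Bool :=
  match preferred_domain with
  | some p => decide (p ≠ "") && (d == p)
  | none => false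

-- one iteration of B's loop over mailboxes: state = (best_all, best_pref)
def altStep (exclude : PySem.Set String) (counts : PySem.Dict String Int) (preferred_domain : Option String)
    (s : Option (List (String × String) × Int) × Option (List (String × String) × Int))
    (mb : List (String × String)) :
    Option (List (String × String) × Int) × Option (List (String × String) × Int) :=
  let email := mbEmail mb
  let d := pyGetDomain email
  if PySem.Set.contains exclude d then s
  else
    let c := counts.getD email 0
    (altUpd mb c s.1, if altPrefOk preferred_domain d then altUpd mb c s.2 else s.2)

def select_best_mailbox_alt (mailboxes : List (List (String × String))) (preferred_domain : Option String) (exclude_domains : Option (List String)) (mailbox_counts : Option (List (String × Int))) : Option (List (String × String)) :=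
  let exclude := PySem.Set.ofList (exclude_domains.getD [])
  let counts := PySem.Dict.mk (mailbox_counts.getD [])
  let r := mailboxes.foldl (altStep exclude counts preferred_domain) (none, none)
  if (match preferred_domain with | some p => decide (p ≠ "") | none => false) && r.2.isSome
  then r.2.map Prod.fst
  else r.1.map Prod.fst

-- ===== PRECONDITION & SPEC =====
-- Pre_ excludes exactly the inputs where some mailbox lacks the "email" key, on which A raises KeyError.
def Pre_select_best_mailbox (mailboxes : List (List (String × String))) (preferred_domain : Option String) (exclude_domains : Option (List String)) (mailbox_counts : Option (List (String × Int))) : Prop :=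
  ∀ mb ∈ mailboxes, (PySem.Dict.mk mb).contains "email" = true
instance (mailboxes : List (List (String × String))) (preferred_domain : Option String) (exclude_domains : Option (List String)) (mailbox_counts : Option (List (String × Int))) : Decidable (Pre_select_best_mailbox mailboxes preferred_domain exclude_domains mailbox_counts) := by unfold Pre_select_best_mailbox; infer_instance
def pvWitness_select_best_mailbox : (List (List (String × String))) × Option String × Option (List String) × (Option (List (String × Int))) :=
  ([[("email", "a@x.com")], [("email", "b@y.com")]], some "x.com", some ["z.com"], some [("b@y.com", 1)])
def Spec_select_best_mailbox (mailboxes : List (List (String × String))) (preferred_domain : Option String) (exclude_domains : Option (List String)) (mailbox_counts : Option (List (String × Int))) (out : Option (List (String × String))) : Prop := out = select_best_mailbox_alt mailboxes preferred_domain exclude_domains mailbox_counts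
instance (mailboxes : List (List (String × String))) (preferred_domain : Option String) (exclude_domains : Option (List String)) (mailbox_counts : Option (List (String × Int))) (out : Option (List (String × String))) : Decidable (Spec_select_best_mailbox mailboxes preferred_domain exclude_domains mailbox_counts out) := by unfold Spec_select_best_mailbox; infer_instance

-- ===== CLAIM (what is proved, stated in full; the proofs are below) =====
def Claim_equal_select_best_mailbox : Prop := ∀ (mailboxes : List (List (String × String))) (preferred_domain : Option String) (exclude_domains : Option (List String)) (mailbox_counts : Option (List (String × Int))), Dom_select_best_mailbox mailboxes preferred_domain exclude_domains mailbox_counts → Pre_select_best_mailbox mailboxes preferred_domain exclude_domains mailbox_counts → Spec_select_best_mailbox mailboxes preferred_domain exclude_domains mailbox_counts (select_best_mailbox mailboxes preferred_domain exclude_domains mailbox_counts)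

-- ===== LEMMAS AND PROOFS =====

theorem min?_eq_fold (f : List (String × String) → Int) (ys : List (List (String × String))) :
    PySem.List.min? ys f = ys.foldl (fun a x => match a with | none => some x | some m => if f x < f m then some x else some m) none := by
  unfold PySem.List.min?
  congr 1
  funext a x
  cases a <;> rfl

theorem foldl_altUpd_eq_min? (f : List (String × String) → Int) (ys : List (List (String × String))) (acc : Option (List (String × String))) :
    ys.foldl (fun s mb => altUpd mb (f mb) s) (acc.map (fun m => (m, f m)))
      = (ys.foldl (fun a x => match a with | none => some x | some m => if f x < f m then some x else some m) acc).map (fun m => (m, f m)) := by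
  induction ys generalizing acc with
  | nil => rfl
  | cons y t ih =>
    simp only [List.foldl_cons]
    rw [← ih]
    congr 1
    cases acc with
    | none => rfl
    | some m => simp [altUpd]; split <;> rfl

theorem min?_const_zero (f : List (String × String) → Int) (h : ∀ x, f x = 0) (cs : List (List (String × String))) :
    PySem.List.min? cs f = cs.head? := by
  cases cs with
  | nil => rfl
  | cons c t =>
    unfold PySem.List.min?
    simp only [List.foldl_cons, List.head?_cons]
    induction t with
    | nil => rfl
    | cons y u ih => simpa [h] using ih

theorem foldl_altStep_split (exclude : PySem.Set String) (counts : PySem.Dict String Int) (pref : Option String)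
    (xs : List (List (String × String))) (a b : Option (List (String × String) × Int)) :
    xs.foldl (altStep exclude counts pref) (a, b)
      = (xs.foldl (fun s mb => if !(PySem.Set.contains exclude (pyGetDomain (mbEmail mb))) then altUpd mb (counts.getD (mbEmail mb) 0) s else s) a,
         xs.foldl (fun s mb => if !(PySem.Set.contains exclude (pyGetDomain (mbEmail mb))) && altPrefOk pref (pyGetDomain (mbEmail mb)) then altUpd mb (counts.getD (mbEmail mb) 0) s else s) b) := by
  induction xs generalizing a b with
  | nil => rfl
  | cons x t ih =>
    simp only [List.foldl_cons]
    rw [show altStep exclude counts pref (a, b) x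
        = ((if !(PySem.Set.contains exclude (pyGetDomain (mbEmail x))) then altUpd x (counts.getD (mbEmail x) 0) a else a),
           (if !(PySem.Set.contains exclude (pyGetDomain (mbEmail x))) && altPrefOk pref (pyGetDomain (mbEmail x)) then altUpd x (counts.getD (mbEmail x) 0) b else b)) from by
      unfold altStep
      by_cases h : pyGetDomain (mbEmail x) ∈ exclude <;> simp [h]]
    exact ih _ _

theorem pickLeastUsed_eq_min? (counts : PySem.Dict String Int) (cs : List (List (String × String))) :
    pickLeastUsed counts cs = PySem.List.min? cs (fun mb => counts.getD (mbEmail mb) 0) := by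
  unfold pickLeastUsed
  by_cases hcs : cs = []
  · subst hcs; rfl
  · simp only [hcs, if_false]
    by_cases hc : counts.items = []
    · have hcounts : counts = PySem.Dict.mk [] := by cases counts; simp_all
      subst hcounts
      rw [min?_const_zero _ (fun x => by simp [PySem.Dict.getD, PySem.Dict.get?])]
      simp
      cases cs with
      | nil => simp at hcs
      | cons c t => simp [PySem.List.pyGetD_zero_cons]
    · simp [hc]

theorem guarded_fold_eq (q : List (String × String) → Bool) (f : List (String × String) → Int)
    (xs : List (List (String × String))) :
    xs.foldl (fun s mb => if q mb then altUpd mb (f mb) s else s) none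
      = (PySem.List.min? (xs.filter q) f).map (fun m => (m, f m)) := by
  rw [← List.foldl_filter]
  have h := foldl_altUpd_eq_min? f (xs.filter q) none
  simpa [min?_eq_fold] using h

theorem select_best_mailbox_agrees : ∀ (mailboxes : List (List (String × String))) (preferred_domain : Option String) (exclude_domains : Option (List String)) (mailbox_counts : Option (List (String × Int))),
    Pre_select_best_mailbox mailboxes preferred_domain exclude_domains mailbox_counts →
    select_best_mailbox mailboxes preferred_domain exclude_domains mailbox_counts
      = select_best_mailbox_alt mailboxes preferred_domain exclude_domains mailbox_counts := by
  intro xs pref excl cnts hpre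
  unfold select_best_mailbox select_best_mailbox_alt
  dsimp only
  rw [foldl_altStep_split]
  rw [guarded_fold_eq (fun mb => !(PySem.Set.contains (PySem.Set.ofList (excl.getD [])) (pyGetDomain (mbEmail mb)))) (fun mb => (PySem.Dict.mk (cnts.getD [])).getD (mbEmail mb) 0)]
  rw [guarded_fold_eq (fun mb => !(PySem.Set.contains (PySem.Set.ofList (excl.getD [])) (pyGetDomain (mbEmail mb))) && altPrefOk pref (pyGetDomain (mbEmail mb))) (fun mb => (PySem.Dict.mk (cnts.getD [])).getD (mbEmail mb) 0)]
  simp only [Option.map_map, Option.isSome_map]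
  have hmapfst : ∀ (o : Option (List (String × String))) (f : List (String × String) → Int),
      o.map (Prod.fst ∘ (fun m => (m, f m))) = o := by
    intro o f; cases o <;> rfl
  rw [hmapfst, hmapfst]
  cases pref with
  | none =>
    simp only [altPrefOk, Bool.and_false, Bool.false_and]
    simp [pickLeastUsed_eq_min?]
  | some p =>
    by_cases hp : p = ""
    · subst hp
      simp [altPrefOk, pickLeastUsed_eq_min?]
    · have hfilt : xs.filter (fun mb =>
          pyGetDomain (mbEmail mb) == p && !(PySem.Set.contains (PySem.Set.ofList (excl.getD [])) (pyGetDomain (mbEmail mb))))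
        = xs.filter (fun mb => !(PySem.Set.contains (PySem.Set.ofList (excl.getD [])) (pyGetDomain (mbEmail mb))) && altPrefOk (some p) (pyGetDomain (mbEmail mb))) := by
        apply List.filter_congr
        intro mb _
        simp [altPrefOk, hp, Bool.and_comm]
      simp only [hp, if_true, decide_true, Bool.true_and, ne_eq, not_false_iff, pickLeastUsed_eq_min?]
      rw [hfilt]
      cases hm : PySem.List.min? (xs.filter (fun mb => !(PySem.Set.contains (PySem.Set.ofList (excl.getD [])) (pyGetDomain (mbEmail mb))) && altPrefOk (some p) (pyGetDomain (mbEmail mb)))) (fun mb => (PySem.Dict.mk (cnts.getD [])).getD (mbEmail mb) 0) with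
      | none => simp
      | some r0 =>
        have hr0 : r0 ≠ [] := by
          have hmem := PySem.List.min?_mem hm
          have hx : r0 ∈ xs := (List.mem_filter.mp hmem).1
          have := hpre r0 hx
          intro h; subst h; simp [PySem.Dict.contains] at this
        simp [hr0]

-- ===== VERDICT (by name: the statement is the Claim_ definition above) =====
theorem select_best_mailbox_spec : Claim_equal_select_best_mailbox := by
  intro mailboxes preferred_domain exclude_domains mailbox_counts _ hpre
  unfold Spec_select_best_mailbox
  exact select_best_mailbox_agrees mailboxes preferred_domain exclude_domains mailbox_counts hpre
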